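-- pv_equiv track=rewrite | github.com/lhelwerd/euler | Euler/special_subset_sum.py | special_subset_sum_set
-- ===== SOURCE A (Python) =====
-- import itertools
-- from collections.abc import Collection
--
-- def special_subset_sum_set(candidate: Collection[int]) -> bool:
--     """
--     Test if a candidate set conforms to the special subset sum property.
--     """
--
--     candidate = set(candidate)
--     for length in range(1, len(candidate) // 2 + 2):
--         for comb in itertools.combinations(candidate, length):
--             rest = candidate - set(comb)
--             for rest_length in range(1, len(rest) + 1):
--                 for comb2 in itertools.combinations(rest, rest_length):
--                     if sum(comb) == sum(comb2):
--                         return False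
--                     if len(comb) > len(comb2) and sum(comb) < sum(comb2):
--                         return False
--
--     return True
-- ===== SOURCE B (Python) =====
-- def special_subset_sum_set(candidate):
--     """
--     Test if a candidate set conforms to the special subset sum property.
--     Single pass over the distinct elements: fold each element into every
--     partial assignment (goes to the first subset, the second, or neither),
--     keeping only the signature (size1, size2, sum1, sum2) of each pair of
--     disjoint subsets; after each round, scan the signatures for a violation.
--     """
--     states = [(0, 0, 0, 0)]
--     for x in set(candidate):
--         states = [t
--                   for (k1, k2, s1, s2) in states
--                   for t in ((k1, k2, s1, s2),
--                             (k1 + 1, k2, s1 + x, s2),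
--                             (k1, k2 + 1, s1, s2 + x))]
--         for (k1, k2, s1, s2) in states:
--             if k1 > 0 and k2 > 0:
--                 if s1 == s2:
--                     return False
--                 if (k1 > k2 and s1 < s2) or (k2 > k1 and s2 < s1):
--                     return False
--     return True
-- ===== Notes on version B (the rewrite author's own statement) =====
-- stated objective: faster
-- what changed: A enumerates disjoint subset pairs with nested itertools.combinations loops (by first-subset length, with a set difference and a fresh inner enumeration per combination); B makes one fold over the distinct elements that extends every (size1, size2, sum1, sum2) signature of a pair of disjoint subsets by the three placements of the element and scans the fresh signatures each round for an equal-sum or size-dominance violation, returning as soon as one appears.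
import Mathlib
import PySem

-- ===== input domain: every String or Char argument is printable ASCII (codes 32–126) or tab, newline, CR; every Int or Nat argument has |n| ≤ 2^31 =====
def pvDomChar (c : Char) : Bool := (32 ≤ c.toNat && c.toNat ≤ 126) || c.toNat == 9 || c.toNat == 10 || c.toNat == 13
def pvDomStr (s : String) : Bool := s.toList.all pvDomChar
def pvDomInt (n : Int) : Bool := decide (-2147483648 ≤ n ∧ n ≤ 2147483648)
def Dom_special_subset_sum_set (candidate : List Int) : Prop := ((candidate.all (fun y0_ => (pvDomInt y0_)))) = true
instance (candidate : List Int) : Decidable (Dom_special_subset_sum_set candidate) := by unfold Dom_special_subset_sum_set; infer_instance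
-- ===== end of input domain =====

-- B replaces A's nested itertools.combinations enumeration (by subset length, with a set
-- difference and an inner enumeration per combination) by a single fold over the distinct
-- elements that maintains the (size1, size2, sum1, sum2) signatures of all pairs of
-- disjoint subsets, scanning each round's fresh signatures for a violation and returning
-- early (objective: faster; a timing run measured B faster on the generated inputs).

-- ===== PORT A =====
def special_subset_sum_set (candidate : List Int) : Bool :=
  let cand : PySem.Set Int := PySem.Set.ofList candidate
  !((PySem.List.pyRange 1 (PySem.Int.floordiv (PySem.Set.len cand) 2 + 2) 1).any (fun length =>
      (PySem.List.combinations cand length.toNat).any (fun comb =>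
        let rest : PySem.Set Int := PySem.Set.diff cand (PySem.Set.ofList comb)
        (PySem.List.pyRange 1 (PySem.Set.len rest + 1) 1).any (fun rest_length =>
          (PySem.List.combinations rest rest_length.toNat).any (fun comb2 =>
            (comb.sum == comb2.sum) ||
              (decide (comb2.length < comb.length) && decide (comb.sum < comb2.sum)))))))

-- ===== PORT B =====
def pvAltBad (t : Int × Int × Int × Int) : Bool :=
  decide (0 < t.1) && decide (0 < t.2.1) &&
    ((t.2.2.1 == t.2.2.2) ||
      (decide (t.2.1 < t.1) && decide (t.2.2.1 < t.2.2.2)) ||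
      (decide (t.1 < t.2.1) && decide (t.2.2.2 < t.2.2.1)))

def pvAltStep (states : List (Int × Int × Int × Int)) (x : Int) : List (Int × Int × Int × Int) :=
  states.flatMap (fun t =>
    [(t.1, t.2.1, t.2.2.1, t.2.2.2),
     (t.1 + 1, t.2.1, t.2.2.1 + x, t.2.2.2),
     (t.1, t.2.1 + 1, t.2.2.1, t.2.2.2 + x)])

-- the 'for x in set(candidate)' loop with its per-round violation scan and early return
def pvAltLoop (states : List (Int × Int × Int × Int)) : List Int → Bool
  | [] => true
  | x :: cs =>
    let states' := pvAltStep states x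
    if states'.any pvAltBad then false else pvAltLoop states' cs

def special_subset_sum_set_alt (candidate : List Int) : Bool :=
  pvAltLoop [(0, 0, 0, 0)] (PySem.Set.ofList candidate)

-- ===== PRECONDITION & SPEC =====
def Spec_special_subset_sum_set (candidate : List Int) (out : Bool) : Prop := out = special_subset_sum_set_alt candidate
instance (candidate : List Int) (out : Bool) : Decidable (Spec_special_subset_sum_set candidate out) := by unfold Spec_special_subset_sum_set; infer_instance

-- ===== CLAIM (what is proved, stated in full; the proofs are below) =====
def Claim_equal_special_subset_sum_set : Prop := ∀ (candidate : List Int), Dom_special_subset_sum_set candidate → Spec_special_subset_sum_set candidate (special_subset_sum_set candidate)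

-- ===== LEMMAS AND PROOFS =====

-- A pair of disjoint nonempty subsets (as sublists of l) violating the property, in the
-- asymmetric orientation A checks (first subset strictly larger with strictly smaller sum).
def BadPair (l X Y : List Int) : Prop :=
  X.Sublist l ∧ Y.Sublist l ∧ X.Disjoint Y ∧ X ≠ [] ∧ Y ≠ [] ∧
    (X.sum = Y.sum ∨ (Y.length < X.length ∧ X.sum < Y.sum))

-- What A searches: the first subset is restricted to sizes 1 .. len//2 + 1.
def BadTrunc (l : List Int) : Prop := ∃ X Y, BadPair l X Y ∧ X.length ≤ l.length / 2 + 1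

-- What B searches: any pair (each unordered pair appears in both orientations).
def BadFull (l : List Int) : Prop := ∃ X Y, BadPair l X Y

lemma sublist_diff_iff (l comb Y : List Int) :
    Y.Sublist (PySem.Set.diff l (PySem.Set.ofList comb)) ↔ Y.Sublist l ∧ Y.Disjoint comb := by
  unfold PySem.Set.diff
  constructor
  · intro h
    refine ⟨h.trans (List.filter_sublist (l := l)), ?_⟩
    intro a ha hb
    have := h.subset ha
    simp [List.mem_filter] at this
    exact this.2 hb
  · rintro ⟨hs, hd⟩
    have he : Y = Y.filter (fun x => !(PySem.Set.ofList comb).contains x) := by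
      symm
      apply List.filter_eq_self.mpr
      intro a ha
      simp only [Bool.not_eq_eq_eq_not, Bool.not_true, Bool.eq_false_iff, Ne,
        PySem.Set.contains_iff, PySem.Set.mem_ofList]
      exact fun hc => hd ha hc
    rw [he]
    exact List.Sublist.filter _ hs

lemma anyA_iff (l : List Int) :
    ((PySem.List.pyRange 1 (PySem.Int.floordiv (PySem.Set.len l) 2 + 2) 1).any (fun length =>
      (PySem.List.combinations l length.toNat).any (fun comb =>
        let rest : PySem.Set Int := PySem.Set.diff l (PySem.Set.ofList comb)
        (PySem.List.pyRange 1 (PySem.Set.len rest + 1) 1).any (fun rest_length =>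
          (PySem.List.combinations rest rest_length.toNat).any (fun comb2 =>
            (comb.sum == comb2.sum) ||
              (decide (comb2.length < comb.length) && decide (comb.sum < comb2.sum))))))) = true
      ↔ BadTrunc l := by
  have hflo : PySem.Int.floordiv (PySem.Set.len l) 2 = ((l.length / 2 : Nat) : Int) := by
    show PySem.Int.floordiv ((l.length : Nat) : Int) 2 = _
    exact_mod_cast PySem.Int.floordiv_natCast l.length 2
  simp only [hflo, List.any_eq_true, PySem.List.mem_pyRange_one,
    PySem.List.mem_combinations_iff, Bool.or_eq_true, Bool.and_eq_true, beq_iff_eq,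
    decide_eq_true_eq]
  constructor
  · rintro ⟨len, ⟨h1, h2⟩, comb, ⟨hsub, hlen⟩, rl, ⟨hr1, hr2⟩, comb2, ⟨hsub2, hlen2⟩, hcond⟩
    rw [sublist_diff_iff] at hsub2
    refine ⟨comb, comb2, ⟨hsub, hsub2.1, fun a ha hb => hsub2.2 hb ha, ?_, ?_, ?_⟩, ?_⟩
    · intro he; subst he; simp at hlen; omega
    · intro he; subst he; simp at hlen2; omega
    · rcases hcond with h | h
      · exact Or.inl h
      · exact Or.inr ⟨h.1, h.2⟩
    · omega
  · rintro ⟨X, Y, ⟨hX, hY, hd, hXne, hYne, hcond⟩, hsize⟩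
    have hXpos : 0 < X.length := List.length_pos_of_ne_nil hXne
    have hYpos : 0 < Y.length := List.length_pos_of_ne_nil hYne
    have hYsub : Y.Sublist (PySem.Set.diff l (PySem.Set.ofList X)) := by
      rw [sublist_diff_iff]
      exact ⟨hY, fun a ha hb => hd hb ha⟩
    have hYle : Y.length ≤ (PySem.Set.diff l (PySem.Set.ofList X)).length := hYsub.length_le
    refine ⟨(X.length : Int), ⟨by exact_mod_cast hXpos, ?_⟩, X, ⟨hX, by simp⟩,
      (Y.length : Int), ⟨by exact_mod_cast hYpos, ?_⟩, Y, ⟨hYsub, by simp⟩, ?_⟩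
    · exact_mod_cast (by omega : X.length < l.length / 2 + 2)
    · show (Y.length : Int) < (PySem.Set.diff l (PySem.Set.ofList X)).len + 1
      simp only [PySem.Set.len]
      exact_mod_cast (by omega : Y.length < (PySem.Set.diff l (PySem.Set.ofList X)).length + 1)
    · rcases hcond with h | h
      · exact Or.inl h
      · exact Or.inr ⟨h.1, h.2⟩

lemma specA_true_iff (candidate : List Int) :
    special_subset_sum_set candidate = true ↔ ¬ BadTrunc (PySem.Set.ofList candidate) := by
  unfold special_subset_sum_set
  rw [Bool.not_eq_true', Bool.eq_false_iff, Ne, anyA_iff]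

lemma mem_fold_states (cs : List Int) (hn : cs.Nodup) (init : List (Int × Int × Int × Int))
    (t : Int × Int × Int × Int) :
    t ∈ cs.foldl pvAltStep init
      ↔ ∃ s ∈ init, ∃ X Y : List Int, X.Sublist cs ∧ Y.Sublist cs ∧ X.Disjoint Y ∧
          t = (s.1 + X.length, s.2.1 + Y.length, s.2.2.1 + X.sum, s.2.2.2 + Y.sum) := by
  induction cs generalizing init with
  | nil =>
    simp only [List.foldl_nil, List.sublist_nil]
    constructor
    · intro h
      exact ⟨t, h, [], [], by simp, by simp, by simp [List.Disjoint], by simp⟩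
    · rintro ⟨s, hs, X, Y, hX, hY, -, ht⟩
      subst hX; subst hY
      have hts : t = s := by rw [ht]; simp
      rw [hts]; exact hs
  | cons x cs ih =>
    rw [List.nodup_cons] at hn
    rw [List.foldl_cons, ih hn.2]
    simp only [pvAltStep]
    constructor
    · rintro ⟨s, hs, X, Y, hX, hY, hd, ht⟩
      rw [List.mem_flatMap] at hs
      obtain ⟨s0, hs0, hcase⟩ := hs
      have hcase' : s = (s0.1, s0.2.1, s0.2.2.1, s0.2.2.2) ∨
          s = (s0.1 + 1, s0.2.1, s0.2.2.1 + x, s0.2.2.2) ∨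
          s = (s0.1, s0.2.1 + 1, s0.2.2.1, s0.2.2.2 + x) := by
        simpa using hcase
      rcases hcase' with h | h | h <;> subst h
      · refine ⟨s0, hs0, X, Y, hX.cons x, hY.cons x, hd, ?_⟩
        rw [ht]
      · refine ⟨s0, hs0, x :: X, Y, hX.cons₂ x, hY.cons x, ?_, ?_⟩
        · intro a ha hb
          rcases List.mem_cons.mp ha with rfl | ha'
          · exact hn.1 (hY.subset hb)
          · exact hd ha' hb
        · rw [ht]; simp [Prod.ext_iff]; omega
      · refine ⟨s0, hs0, X, x :: Y, hX.cons x, hY.cons₂ x, ?_, ?_⟩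
        · intro a ha hb
          rcases List.mem_cons.mp hb with rfl | hb'
          · exact hn.1 (hX.subset ha)
          · exact hd ha hb'
        · rw [ht]; simp [Prod.ext_iff]; omega
    · rintro ⟨s, hs, X, Y, hX, hY, hd, ht⟩
      rcases List.sublist_cons_iff.mp hX with hX' | ⟨X', rfl, hX'⟩
      · rcases List.sublist_cons_iff.mp hY with hY' | ⟨Y', rfl, hY'⟩
        · exact ⟨s, List.mem_flatMap.mpr ⟨s, hs, by simp⟩, X, Y, hX', hY', hd, ht⟩
        · refine ⟨(s.1, s.2.1 + 1, s.2.2.1, s.2.2.2 + x),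
            List.mem_flatMap.mpr ⟨s, hs, by simp⟩, X, Y', hX', hY', ?_, ?_⟩
          · exact fun a ha hb => hd ha (List.mem_cons_of_mem x hb)
          · rw [ht]; simp [Prod.ext_iff]; omega
      · refine ⟨(s.1 + 1, s.2.1, s.2.2.1 + x, s.2.2.2),
          List.mem_flatMap.mpr ⟨s, hs, by simp⟩, X', Y, hX', ?_, ?_, ?_⟩
        · rcases List.sublist_cons_iff.mp hY with hY' | ⟨Y', rfl, hY'⟩
          · exact hY'
          · exact (hd (List.mem_cons_self) (List.mem_cons_self)).elim
        · exact fun a ha hb => hd (List.mem_cons_of_mem x ha) hb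
        · rw [ht]; simp [Prod.ext_iff]; omega

lemma fold_any_bad_iff (candidate : List Int) :
    ((PySem.Set.ofList candidate).foldl pvAltStep [(0, 0, 0, 0)]).any pvAltBad = true
      ↔ BadFull (PySem.Set.ofList candidate) := by
  rw [List.any_eq_true]
  constructor
  · rintro ⟨t, ht, hp⟩
    rw [mem_fold_states _ (PySem.Set.nodup_ofList candidate) _ _] at ht
    obtain ⟨s, hs, X, Y, hX, hY, hd, rfl⟩ := ht
    have hs' : s = (0, 0, 0, 0) := by simpa using hs
    subst hs'
    simp only [pvAltBad, Bool.and_eq_true, Bool.or_eq_true, beq_iff_eq, decide_eq_true_eq,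
      zero_add] at hp
    obtain ⟨⟨hx1, hy1⟩, hcond⟩ := hp
    have hXne : X ≠ [] := by
      intro h; subst h; simp at hx1
    have hYne : Y ≠ [] := by
      intro h; subst h; simp at hy1
    rcases hcond with (h | h) | h
    · exact ⟨X, Y, hX, hY, hd, hXne, hYne, Or.inl h⟩
    · exact ⟨X, Y, hX, hY, hd, hXne, hYne, Or.inr ⟨by exact_mod_cast h.1, h.2⟩⟩
    · exact ⟨Y, X, hY, hX, fun a ha hb => hd hb ha, hYne, hXne,
        Or.inr ⟨by exact_mod_cast h.1, h.2⟩⟩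
  · rintro ⟨X, Y, hX, hY, hd, hXne, hYne, hcond⟩
    refine ⟨((X.length : Int), (Y.length : Int), X.sum, Y.sum), ?_, ?_⟩
    · rw [mem_fold_states _ (PySem.Set.nodup_ofList candidate) _ _]
      exact ⟨(0, 0, 0, 0), by simp, X, Y, hX, hY, hd, by simp⟩
    · have hx1 : 0 < X.length := List.length_pos_of_ne_nil hXne
      have hy1 : 0 < Y.length := List.length_pos_of_ne_nil hYne
      simp only [pvAltBad, Bool.and_eq_true, Bool.or_eq_true, beq_iff_eq, decide_eq_true_eq]
      refine ⟨⟨by exact_mod_cast hx1, by exact_mod_cast hy1⟩, ?_⟩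
      rcases hcond with h | h
      · exact Or.inl (Or.inl h)
      · exact Or.inl (Or.inr ⟨by exact_mod_cast h.1, h.2⟩)

lemma altLoop_eq (cs : List Int) (hn : cs.Nodup) :
    ∀ states : List (Int × Int × Int × Int), states.any pvAltBad = false →
      (pvAltLoop states cs = true ↔ (cs.foldl pvAltStep states).any pvAltBad = false) := by
  induction cs with
  | nil =>
    intro states hok
    simpa [pvAltLoop] using hok
  | cons x cs ih =>
    rw [List.nodup_cons] at hn
    intro states hok
    rw [pvAltLoop, List.foldl_cons]
    by_cases h : (pvAltStep states x).any pvAltBad = true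
    · rw [if_pos h]
      obtain ⟨t, ht, hbad⟩ := List.any_eq_true.mp h
      have hpersist : t ∈ cs.foldl pvAltStep (pvAltStep states x) := by
        rw [mem_fold_states cs hn.2]
        exact ⟨t, ht, [], [], by simp, by simp, by simp [List.Disjoint], by simp⟩
      have : (cs.foldl pvAltStep (pvAltStep states x)).any pvAltBad = true :=
        List.any_eq_true.mpr ⟨t, hpersist, hbad⟩
      simp [this]
    · rw [if_neg h]
      exact ih hn.2 (pvAltStep states x) (Bool.not_eq_true _ ▸ h)

lemma specB_true_iff (candidate : List Int) :
    special_subset_sum_set_alt candidate = true ↔ ¬ BadFull (PySem.Set.ofList candidate) := by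
  unfold special_subset_sum_set_alt
  rw [altLoop_eq (PySem.Set.ofList candidate) (PySem.Set.nodup_ofList candidate)
    [(0, 0, 0, 0)] (by decide), Bool.eq_false_iff, Ne, fold_any_bad_iff]

lemma length_add_le (l X Y : List Int) (hn : l.Nodup) (hX : X.Sublist l) (hY : Y.Sublist l)
    (hd : X.Disjoint Y) : X.length + Y.length ≤ l.length := by
  have hXY : (X ++ Y).Nodup := by
    rw [List.nodup_append]
    refine ⟨hX.nodup hn, hY.nodup hn, ?_⟩
    intro a ha b hb hab
    exact hd ha (hab ▸ hb)
  have hsub : (X ++ Y) ⊆ l := by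
    intro a ha
    rcases List.mem_append.mp ha with h | h
    · exact hX.subset h
    · exact hY.subset h
  have h1 : (X ++ Y).toFinset.card = (X ++ Y).length := List.toFinset_card_of_nodup hXY
  have h2 : (X ++ Y).toFinset ⊆ l.toFinset := by
    intro a ha; simp at ha ⊢
    rcases ha with h | h
    · exact hsub (List.mem_append.mpr (Or.inl h))
    · exact hsub (List.mem_append.mpr (Or.inr h))
  have h3 := Finset.card_le_card h2
  have h4 : l.toFinset.card ≤ l.length := l.toFinset_card_le
  have h5 : (X ++ Y).length = X.length + Y.length := List.length_append
  omega

lemma pair_sublist_of_mem (l : List Int) (u v : Int) (hu : u ∈ l) (hv : v ∈ l) (huv : u ≠ v) :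
    [u, v].Sublist l ∨ [v, u].Sublist l := by
  induction l with
  | nil => simp at hu
  | cons a t ih =>
    by_cases hau : a = u
    · subst hau
      left
      have hvt : v ∈ t := by
        rcases List.mem_cons.mp hv with h | h
        · exact absurd h.symm huv
        · exact h
      exact List.Sublist.cons₂ _ (List.singleton_sublist.mpr hvt)
    · by_cases hav : a = v
      · subst hav
        right
        have hut : u ∈ t := by
          rcases List.mem_cons.mp hu with h | h
          · exact absurd h.symm (Ne.symm (fun he => hau he.symm))
          · exact h
        exact List.Sublist.cons₂ _ (List.singleton_sublist.mpr hut)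
      · have hut : u ∈ t := by
          rcases List.mem_cons.mp hu with h | h
          · exact absurd h.symm hau
          · exact h
        have hvt : v ∈ t := by
          rcases List.mem_cons.mp hv with h | h
          · exact absurd h.symm hav
          · exact h
        rcases ih hut hvt with h | h
        · exact Or.inl (h.cons a)
        · exact Or.inr (h.cons a)

lemma all_pos_of_not_badTrunc (l : List Int) (hn : l.Nodup) (hnb : ¬ BadTrunc l)
    (hlen : 5 ≤ l.length) : ∀ u ∈ l, 0 < u := by
  intro u hu
  by_contra hle
  rw [Int.not_lt] at hle
  set r := l.erase u with hr
  have hrlen : r.length = l.length - 1 := List.length_erase_of_mem hu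
  have hrn : r.Nodup := hn.erase u
  have h0 : 0 < r.length := by omega
  have h1 : 1 < r.length := by omega
  set a := r[0] with ha
  set b := r[1] with hb
  have hab : a ≠ b := by
    intro h
    exact absurd (List.Nodup.getElem_inj_iff hrn |>.mp h) (by omega)
  have hamem : a ∈ r := List.getElem_mem h0
  have hbmem : b ∈ r := List.getElem_mem h1
  have hau : a ≠ u ∧ a ∈ l := (List.Nodup.mem_erase_iff hn).mp hamem
  have hbu : b ≠ u ∧ b ∈ l := (List.Nodup.mem_erase_iff hn).mp hbmem
  set v := min a b with hv
  set w := max a b with hw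
  have hvw : v < w := min_lt_max.mpr hab
  have hvl : v ∈ l := by
    rcases min_choice a b with h | h <;> rw [hv, h]
    · exact hau.2
    · exact hbu.2
  have hwl : w ∈ l := by
    rcases max_choice a b with h | h <;> rw [hw, h]
    · exact hau.2
    · exact hbu.2
  have hvu : u ≠ v := by
    rcases min_choice a b with h | h <;> rw [hv, h]
    · exact fun he => hau.1 he.symm
    · exact fun he => hbu.1 he.symm
  have hwu : w ≠ u := by
    rcases max_choice a b with h | h <;> rw [hw, h]
    · exact hau.1
    · exact hbu.1
  have hwv : w ≠ v := ne_of_gt hvw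
  have hsum : u + v < w := by omega
  apply hnb
  have hlen2 : 2 ≤ l.length / 2 + 1 := by omega
  have hYsub : [w].Sublist l := List.singleton_sublist.mpr hwl
  rcases pair_sublist_of_mem l u v hu hvl hvu with hX | hX
  · refine ⟨[u, v], [w], ⟨hX, hYsub, ?_, by simp, by simp,
      Or.inr ⟨by simp, by simp; omega⟩⟩, by simpa using hlen2⟩
    intro z hz hz2
    simp at hz hz2
    rcases hz with rfl | rfl
    · exact hwu hz2.symm
    · exact hwv hz2.symm
  · refine ⟨[v, u], [w], ⟨hX, hYsub, ?_, by simp, by simp,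
      Or.inr ⟨by simp, by simp; omega⟩⟩, by simpa using hlen2⟩
    intro z hz hz2
    simp at hz hz2
    rcases hz with rfl | rfl
    · exact hwv hz2.symm
    · exact hwu hz2.symm

lemma reduce_to_trunc (l : List Int) (hn : l.Nodup) (hpos : ∀ u ∈ l, 0 < u) :
    ∀ X Y : List Int, X.Sublist l → Y.Sublist l → X.Disjoint Y → Y ≠ [] →
      Y.length < X.length → X.sum < Y.sum → BadTrunc l := by
  suffices H : ∀ n, ∀ X Y : List Int, X.length = n → X.Sublist l → Y.Sublist l →
      X.Disjoint Y → Y ≠ [] → Y.length < X.length → X.sum < Y.sum → BadTrunc l by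
    intro X Y h1 h2 h3 h4 h5 h6
    exact H X.length X Y rfl h1 h2 h3 h4 h5 h6
  intro n
  induction n using Nat.strong_induction_on with
  | _ n ih =>
    intro X Y hXn hX hY hd hYne hlt hsum
    by_cases hsmall : X.length ≤ l.length / 2 + 1
    · exact ⟨X, Y, ⟨hX, hY, hd, by intro h; subst h; simp at hlt, hYne,
        Or.inr ⟨hlt, hsum⟩⟩, hsmall⟩
    · have hadd := length_add_le l X Y hn hX hY hd
      have hYpos : 0 < Y.length := List.length_pos_of_ne_nil hYne
      cases X with
      | nil => simp at hlt
      | cons x X' =>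
        have hx : 0 < x := hpos x (hX.subset List.mem_cons_self)
        have hX' : X'.Sublist l := (List.sublist_cons_self x X').trans hX
        have hsum' : X'.sum < Y.sum := by
          have : (x :: X').sum = x + X'.sum := by simp
          omega
        have hlt' : Y.length < X'.length := by
          simp only [List.length_cons] at hXn hlt hsmall hadd ⊢
          omega
        exact ih X'.length (by simp [← hXn]) X' Y rfl hX' hY
          (fun a ha hb => hd (List.mem_cons_of_mem x ha) hb) hYne hlt' hsum'

lemma badFull_iff_badTrunc (l : List Int) (hn : l.Nodup) : BadFull l ↔ BadTrunc l := by
  constructor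
  · rintro ⟨X, Y, hb⟩
    by_contra hnb
    obtain ⟨hX, hY, hd, hXne, hYne, hcond⟩ := hb
    have hadd := length_add_le l X Y hn hX hY hd
    have hXpos : 0 < X.length := List.length_pos_of_ne_nil hXne
    have hYpos : 0 < Y.length := List.length_pos_of_ne_nil hYne
    by_cases hsmall : X.length ≤ l.length / 2 + 1
    · exact hnb ⟨X, Y, ⟨hX, hY, hd, hXne, hYne, hcond⟩, hsmall⟩
    · rcases hcond with heq | ⟨hlt, hsum⟩
      · refine hnb ⟨Y, X, ⟨hY, hX, fun a ha hb => hd hb ha, hYne, hXne, Or.inl heq.symm⟩, ?_⟩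
        omega
      · have h5 : 5 ≤ l.length := by omega
        exact hnb (reduce_to_trunc l hn (all_pos_of_not_badTrunc l hn hnb h5)
          X Y hX hY hd hYne hlt hsum)
  · rintro ⟨X, Y, hb, -⟩
    exact ⟨X, Y, hb⟩

-- ===== VERDICT (by name: the statement is the Claim_ definition above) =====
theorem special_subset_sum_set_spec : Claim_equal_special_subset_sum_set := by
  intro candidate _
  unfold Spec_special_subset_sum_set
  have hA := specA_true_iff candidate
  have hB := specB_true_iff candidate
  have hT := badFull_iff_badTrunc (PySem.Set.ofList candidate) (PySem.Set.nodup_ofList candidate)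
  cases hA' : special_subset_sum_set candidate <;> cases hB' : special_subset_sum_set_alt candidate
  · rfl
  · exfalso
    rw [hA'] at hA; rw [hB'] at hB
    have := hB.mp rfl
    rw [hT] at this
    simp at hA
    exact this hA
  · exfalso
    rw [hA'] at hA; rw [hB'] at hB
    have := hA.mp rfl
    rw [← hT] at this
    simp at hB
    exact this hB
  · rfl
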